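-- pv_equiv track=rewrite | github.com/EnriqueSaracho/cpsc-1280 | week-13-recap-and-practice/assignment-10-shell-scripting-review/script10.py | parsePermissions
-- ===== SOURCE A (Python) =====
-- def parsePermissions(permStr):
--     mode = 0
--     mapping = {'r': 4, 'w': 2, 'x': 1, '-': 0}
--     permStr = permStr[1:]
--
--     for i in range(len(permStr)):
--         c = permStr[i]
--         mode += mapping[c] << (8 - (i // 3) * 3)
--     return mode
-- ===== SOURCE B (Python) =====
-- def parsePermissions(permStr):
--     mapping = {'r': 4, 'w': 2, 'x': 1, '-': 0}
--
--     def go(s, g):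
--         if not s:
--             return 0
--         digit = sum(mapping[c] for c in s[:3])
--         return (digit << (8 - 3 * g)) + go(s[3:], g + 1)
--
--     return go(permStr[1:], 0)
-- ===== Notes on version B (the rewrite author's own statement) =====
-- stated objective: alternative
-- what changed: Replaces A's single flat indexed loop computing i//3 per character with a recursive group-by-group decomposition: each 3-character chunk is summed into one octal digit and shifted once per group.
import Mathlib
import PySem

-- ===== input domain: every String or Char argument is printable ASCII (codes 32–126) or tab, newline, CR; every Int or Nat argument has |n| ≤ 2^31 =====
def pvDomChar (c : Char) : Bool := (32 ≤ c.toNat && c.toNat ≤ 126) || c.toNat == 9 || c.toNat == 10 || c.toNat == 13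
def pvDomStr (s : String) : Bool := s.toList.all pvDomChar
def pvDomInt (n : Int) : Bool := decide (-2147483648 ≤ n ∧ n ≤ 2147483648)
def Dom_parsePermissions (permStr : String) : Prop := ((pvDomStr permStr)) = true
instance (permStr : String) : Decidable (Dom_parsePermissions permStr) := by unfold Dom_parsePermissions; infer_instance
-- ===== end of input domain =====

-- B regroups A's flat indexed loop into explicit groups of three characters (one octal digit per
-- group, shifted once per group): a different decomposition, same exact values (objective: alternative).

-- the mapping dict (a character without a mapping entry raises KeyError in Python; excluded by Pre_)
def permVal (c : Char) : Int :=
  if c = 'r' then 4 else if c = 'w' then 2 else if c = 'x' then 1 else 0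

-- ===== PORT A =====
-- 'v << sh' is v <<< sh.toNat; exact for sh ≥ 0 (sh < 0 raises in Python, excluded by Pre_)
def parsePermissions (permStr : String) : Int :=
  let s := PySem.List.slice permStr.toList (some 1) none
  (PySem.List.pyRange 0 s.length 1).foldl
    (fun mode i =>
      mode + permVal (PySem.List.pyGetD s i ' ') <<< ((8 - (PySem.Int.floordiv i 3) * 3).toNat))
    0

-- ===== PORT B =====
-- B's own mapping dict
def permValB (c : Char) : Int :=
  if c = 'r' then 4 else if c = 'w' then 2 else if c = 'x' then 1 else 0

-- recursive helper 'go(s, g)' of Source B: first ≤3 chars form one octal digit, shifted by 8-3g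
def permGo : List Char → Nat → Int
  | [], _ => 0
  | a :: rest, g =>
      (((a :: rest).take 3).foldl (fun d c => d + permValB c) 0) <<< ((8 - 3 * (g : Int)).toNat)
        + permGo ((a :: rest).drop 3) (g + 1)
  termination_by s _ => s.length
  decreasing_by simp

def parsePermissions_alt (permStr : String) : Int :=
  permGo (PySem.List.slice permStr.toList (some 1) none) 0

-- ===== PRECONDITION & SPEC =====
-- Pre_ excludes exactly the inputs where the Python A raises: a character of permStr[1:] with no
-- mapping entry is a KeyError, and len(permStr[1:]) > 9 makes the shift negative (ValueError).
def Pre_parsePermissions (permStr : String) : Prop :=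
  permStr.toList.tail.length ≤ 9 ∧
    permStr.toList.tail.all (fun c => c == 'r' || c == 'w' || c == 'x' || c == '-') = true
instance (permStr : String) : Decidable (Pre_parsePermissions permStr) := by
  unfold Pre_parsePermissions; infer_instance

def pvWitness_parsePermissions : String := "-rwx"

def Spec_parsePermissions (permStr : String) (out : Int) : Prop := out = parsePermissions_alt permStr
instance (permStr : String) (out : Int) : Decidable (Spec_parsePermissions permStr out) := by
  unfold Spec_parsePermissions; infer_instance

-- ===== CLAIM (what is proved, stated in full; the proofs are below) =====
def Claim_equal_parsePermissions : Prop := ∀ (permStr : String), Dom_parsePermissions permStr → Pre_parsePermissions permStr → Spec_parsePermissions permStr (parsePermissions permStr)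

-- ===== LEMMAS AND PROOFS =====

-- flat-sum characterisation of B's grouped recursion, with running group index g
theorem permGo_eq_sum (s : List Char) (g : Nat) :
    permGo s g =
      ((List.range s.length).map
        (fun i => permValB (s.getD i ' ') * 2 ^ ((8 : Int) - 3 * (↑(i / 3) + ↑g)).toNat)).sum := by
  induction s, g using permGo.induct with
  | case1 g => simp [permGo]
  | case2 a rest g ih =>
    match rest with
    | [] =>
      simp [permGo, Int.shiftLeft_eq]
    | [b] =>
      simp [permGo, Int.shiftLeft_eq, List.range_succ]
      ring
    | b :: c :: r =>
      simp only [permGo, List.take, List.drop] at *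
      have hlen : (a :: b :: c :: r).length = 3 + r.length := by simp; omega
      rw [hlen, List.range_add]
      have h2 : ∀ i : Nat, (3 + i) / 3 = i / 3 + 1 := by
        intro i; omega
      simp only [List.map_append, List.sum_append, List.map_map]
      have htail :
          ((List.range r.length).map
              ((fun i => permValB ((a :: b :: c :: r).getD i ' ') *
                  2 ^ ((8 : Int) - 3 * (↑(i / 3) + ↑g)).toNat) ∘ (fun x => 3 + x))).sum
            = ((List.range r.length).map
              (fun i => permValB (r.getD i ' ') *
                  2 ^ ((8 : Int) - 3 * (↑(i / 3) + ↑(g + 1))).toNat)).sum := by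
        congr 1
        apply List.map_congr_left
        intro i _
        simp only [Function.comp, Nat.add_comm 3 i]
        have hg : (a :: b :: c :: r).getD (i + 3) ' ' = r.getD i ' ' := rfl
        have h3 : (i + 3) / 3 = i / 3 + 1 := by omega
        rw [hg, h3]
        push_cast
        ring_nf
      rw [htail, ← ih]
      simp [List.range_succ, Int.shiftLeft_eq]
      ring

theorem flatA_eq_sum (s : List Char) :
    (PySem.List.pyRange 0 s.length 1).foldl
      (fun mode i =>
        mode + permVal (PySem.List.pyGetD s i ' ') <<< ((8 - (PySem.Int.floordiv i 3) * 3).toNat))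
      0
    = ((List.range s.length).map
        (fun i => permVal (s.getD i ' ') * 2 ^ ((8 : Int) - 3 * (↑(i / 3) + (↑(0:Nat) : Int))).toNat)).sum := by
  rw [PySem.List.pyRange_one]
  simp only [sub_zero, Int.toNat_natCast, List.foldl_map, zero_add]
  rw [PySem.List.foldl_add]
  simp only [zero_add]
  congr 1
  apply List.map_congr_left
  intro i _
  have hfd : PySem.Int.floordiv (i : Int) (3 : Int) = ((i / 3 : Nat) : Int) := by
    exact_mod_cast PySem.Int.floordiv_natCast i 3
  rw [hfd, Int.shiftLeft_eq, PySem.List.pyGetD_natCast]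
  have he : ((8:Int) - ↑(i/3)*3).toNat = ((8:Int) - 3*(↑(i/3) + (↑(0:Nat) : Int))).toNat :=
    congrArg Int.toNat (by push_cast; ring)
  rw [he]

theorem parsePermissions_spec : Claim_equal_parsePermissions := by
  intro permStr _ _
  exact (flatA_eq_sum (PySem.List.slice permStr.toList (some 1) none)).trans
    (permGo_eq_sum (PySem.List.slice permStr.toList (some 1) none) 0).symm
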